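-- pv_equiv track=rewrite | github.com/script-mirror/scripts-unificados | apps/prospec/libs/utils.py | adicionar_simbolo
-- ===== SOURCE A (Python) =====
-- def adicionar_simbolo(linhas: list, simbolos_sequenciais: list = ["&"], intervalo_linhas: int = 5):
--     """
--     Adiciona símbolos em sequência após cada intervalo de linhas.
--     Repete a sequência de símbolos se a lista for menor que o número de intervalos.
--     """
--     linhas_modificadas = []
--     simbolos_len = len(simbolos_sequenciais)
--
--     for i, linha in enumerate(linhas, 1):
--         linhas_modificadas.append(linha)
--         if i % intervalo_linhas == 0:
--             simbolo = simbolos_sequenciais[(i // intervalo_linhas - 1) % simbolos_len]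
--             linhas_modificadas.append(simbolo)
--
--     return linhas_modificadas
-- ===== SOURCE B (Python) =====
-- def adicionar_simbolo(linhas: list, simbolos_sequenciais: list = ["&"], intervalo_linhas: int = 5):
--     """Suffix-consuming rewrite: repeatedly peel one full block off the front of
--     the remaining lines, emitting the block plus the next symbol of the cycle;
--     the leftover partial block is appended at the end."""
--     saida = []
--     resto = linhas
--     j = 0
--     while 0 < intervalo_linhas <= len(resto):
--         saida += resto[:intervalo_linhas]
--         saida.append(simbolos_sequenciais[j % len(simbolos_sequenciais)])
--         resto = resto[intervalo_linhas:]
--         j += 1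
--     return saida + list(resto)
-- ===== Notes on version B (the rewrite author's own statement) =====
-- stated objective: alternative
-- what changed: B repeatedly peels one full block off the front of the remaining suffix in a while-loop over the suffix (slice, symbol by 0-based block counter), appending the leftover partial block at the end, instead of A's enumerate loop testing i % intervalo_linhas on every line with (i // intervalo_linhas - 1) symbol arithmetic.
-- outside the precondition, e.g. on adicionar_simbolo(['a', 'b'], ['x'], -1): A returns ['a', 'x', 'b', 'x'], B returns ['a', 'b']
import Mathlib
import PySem

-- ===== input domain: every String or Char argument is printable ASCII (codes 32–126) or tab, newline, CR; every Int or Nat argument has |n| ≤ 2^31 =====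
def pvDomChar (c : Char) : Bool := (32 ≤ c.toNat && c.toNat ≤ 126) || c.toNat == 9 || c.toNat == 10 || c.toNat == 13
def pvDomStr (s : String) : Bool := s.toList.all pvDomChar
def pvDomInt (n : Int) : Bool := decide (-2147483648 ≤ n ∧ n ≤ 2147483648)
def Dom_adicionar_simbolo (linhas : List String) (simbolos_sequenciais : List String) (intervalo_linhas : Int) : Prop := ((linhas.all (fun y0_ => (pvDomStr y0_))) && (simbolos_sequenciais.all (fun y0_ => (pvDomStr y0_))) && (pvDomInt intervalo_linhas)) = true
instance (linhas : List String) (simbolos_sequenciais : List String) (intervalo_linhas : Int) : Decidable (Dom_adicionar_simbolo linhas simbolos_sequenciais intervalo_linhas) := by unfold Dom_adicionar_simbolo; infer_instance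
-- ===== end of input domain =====

-- B peels full blocks off the front of the remaining suffix in a while-loop (slice per block, symbol
-- by a 0-based block counter) instead of A's line-by-line counter loop with the i % intervalo test;
-- same values on the stated domain (alternative decomposition, no speed claim).


-- ===== PORT A =====
-- loop body of A: append the line; if i % intervalo == 0 append simbolos[(i // intervalo - 1) % len].
-- 'pyGet? … |>.toList': inside Pre_ the index is always in range (some _); a trigger with an empty
-- symbol list (Python raises ZeroDivisionError at '% 0') is excluded by Pre_.
def bodyA (simbolos_sequenciais : List String) (intervalo_linhas : Int)
    (linhas_modificadas : List String) (p : Int × String) : List String :=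
  let linhas_modificadas := linhas_modificadas ++ [p.2]
  if PySem.Int.mod p.1 intervalo_linhas = 0 then
    linhas_modificadas ++ (PySem.List.pyGet? simbolos_sequenciais
      (PySem.Int.mod (PySem.Int.floordiv p.1 intervalo_linhas - 1)
        (simbolos_sequenciais.length : Int))).toList
  else linhas_modificadas

def adicionar_simbolo (linhas : List String) (simbolos_sequenciais : List String) (intervalo_linhas : Int) : List String :=
  (PySem.List.enumerate linhas 1).foldl (bodyA simbolos_sequenciais intervalo_linhas) []

-- ===== PORT B =====
-- B's while loop 'while 0 < intervalo <= len(resto)' as tail recursion on the shrinking suffix: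
-- state (saida, resto, j); each step emits resto[:K] and simbolos[j % len], keeps resto[K:].
-- pyGet? on an empty symbol list (Python's ZeroDivisionError at 'j % 0') is excluded by Pre_.
def goB (simbolos_sequenciais : List String) (intervalo_linhas : Int)
    (saida resto : List String) (j : Int) : List String :=
  if h : 0 < intervalo_linhas ∧ intervalo_linhas ≤ (resto.length : Int) then
    goB simbolos_sequenciais intervalo_linhas
      (saida ++ PySem.List.slice resto none (some intervalo_linhas)
             ++ (PySem.List.pyGet? simbolos_sequenciais
                  (PySem.Int.mod j (simbolos_sequenciais.length : Int))).toList)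
      (PySem.List.slice resto (some intervalo_linhas) none) (j + 1)
  else saida ++ resto
termination_by resto.length
decreasing_by
  rw [PySem.List.slice_from _ (by omega)]
  simp only [List.length_drop]
  omega

def adicionar_simbolo_alt (linhas : List String) (simbolos_sequenciais : List String) (intervalo_linhas : Int) : List String :=
  goB simbolos_sequenciais intervalo_linhas [] linhas 0

-- ===== PRECONDITION & SPEC =====
-- Pre_ keeps the natural domain plus every no-op corner: empty input, a negative interval too large
-- in magnitude to ever trigger (both return the lines unchanged), or a positive interval with
-- symbols available whenever a full interval occurs. Excluded although A returns there: negative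
-- intervals that do reach a multiple of |intervalo| — A's backwards floor-division symbol cycle
-- there is accidental, B leaves the lines unchanged. Also excluded (A raises ZeroDivisionError):
-- a zero interval with non-empty lines, and an empty symbol list once a full interval is reached
-- (then both raise).
def Pre_adicionar_simbolo (linhas : List String) (simbolos_sequenciais : List String) (intervalo_linhas : Int) : Prop :=
  linhas = [] ∨ (intervalo_linhas ≤ -1 ∧ (linhas.length : Int) < -intervalo_linhas)
    ∨ (1 ≤ intervalo_linhas ∧ (simbolos_sequenciais = [] → (linhas.length : Int) < intervalo_linhas))
instance (linhas : List String) (simbolos_sequenciais : List String) (intervalo_linhas : Int) : Decidable (Pre_adicionar_simbolo linhas simbolos_sequenciais intervalo_linhas) := by unfold Pre_adicionar_simbolo; infer_instance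

def pvWitness_adicionar_simbolo : List String × List String × Int := (["a", "b", "c"], (["&", "#"], 2))

def Spec_adicionar_simbolo (linhas : List String) (simbolos_sequenciais : List String) (intervalo_linhas : Int) (out : List String) : Prop := out = adicionar_simbolo_alt linhas simbolos_sequenciais intervalo_linhas
instance (linhas : List String) (simbolos_sequenciais : List String) (intervalo_linhas : Int) (out : List String) : Decidable (Spec_adicionar_simbolo linhas simbolos_sequenciais intervalo_linhas out) := by unfold Spec_adicionar_simbolo; infer_instance

-- ===== CLAIM (what is proved, stated in full; the proofs are below) =====
def Claim_equal_adicionar_simbolo : Prop := ∀ (linhas : List String) (simbolos_sequenciais : List String) (intervalo_linhas : Int), Dom_adicionar_simbolo linhas simbolos_sequenciais intervalo_linhas → Pre_adicionar_simbolo linhas simbolos_sequenciais intervalo_linhas → Spec_adicionar_simbolo linhas simbolos_sequenciais intervalo_linhas (adicionar_simbolo linhas simbolos_sequenciais intervalo_linhas)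

-- ===== LEMMAS AND PROOFS =====

-- the symbol appended after the (j+1)-st full block (both programs compute this expression)
def sym (simbolos : List String) (j : Nat) : List String :=
  (PySem.List.pyGet? simbolos ((j % simbolos.length : Nat) : Int)).toList

-- common reference: process xs block by block, j = 0-based index of the next block
def chunkGo (simbolos : List String) (K : Nat) (j : Nat) (xs : List String) : List String :=
  if 0 < K ∧ K ≤ xs.length then
    xs.take K ++ sym simbolos j ++ chunkGo simbolos K (j + 1) (xs.drop K)
  else xs
termination_by xs.length
decreasing_by simp only [List.length_drop]; omega

theorem enum_append {α : Type} (as bs : List α) (s : Int) :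
    PySem.List.enumerate (as ++ bs) s
      = PySem.List.enumerate as s ++ PySem.List.enumerate bs (s + as.length) := by
  induction as generalizing s with
  | nil => simp [PySem.List.enumerate]
  | cons a t ih =>
      simp only [List.cons_append, PySem.List.enumerate_cons, ih, List.length_cons]
      congr 2
      push_cast; ring

-- between two consecutive multiples of K there is no multiple of K
theorem not_dvd_between (K j v : Int) (hK : 0 < K) (h1 : j * K < v) (h2 : v < (j + 1) * K) :
    ¬ (K ∣ v) := by
  rintro ⟨c, rfl⟩
  rcases lt_trichotomy j c with h | h | h
  · have : j + 1 ≤ c := by omega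
    have := mul_le_mul_of_nonneg_right this (le_of_lt hK)
    have hcK : K * c = c * K := mul_comm _ _
    omega
  · subst h
    have : j * K = K * j := mul_comm _ _
    omega
  · have : c ≤ j := by omega
    have := mul_le_mul_of_nonneg_right this (le_of_lt hK)
    have hcK : K * c = c * K := mul_comm _ _
    omega

-- A's fold over a stretch of counters containing no multiple of K just copies the lines
theorem foldA_no_trigger (simbolos : List String) (K : Int) (ys : List String) :
    ∀ (s : Int) (acc : List String),
    (∀ t : Nat, t < ys.length → ¬ (K ∣ (s + t))) →
    (PySem.List.enumerate ys s).foldl (bodyA simbolos K) acc = acc ++ ys := by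
  induction ys with
  | nil => intro s acc _; simp [PySem.List.enumerate]
  | cons y t ih =>
      intro s acc h
      rw [PySem.List.enumerate_cons, List.foldl_cons]
      have hnd : ¬ (K ∣ s) := by
        have := h 0 (by simp)
        simpa using this
      have hb : bodyA simbolos K acc (s, y) = acc ++ [y] := by
        unfold bodyA
        rw [if_neg]
        intro hc; exact hnd ((PySem.Int.mod_eq_zero_iff_dvd s K).mp hc)
      rw [hb, ih (s + 1) (acc ++ [y]) ?_]
      · simp
      · intro t' ht'
        have h2 := h (t' + 1) (by simpa using Nat.succ_lt_succ ht')
        have he : s + ((t' + 1 : Nat) : Int) = s + 1 + (t' : Int) := by push_cast; ring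
        rw [he] at h2
        exact h2

-- A's fold, started at line counter j*K+1, computes the block decomposition
theorem foldA_chunk (simbolos : List String) (K : Nat) (hK : 0 < K) :
    ∀ (n : Nat) (xs : List String), xs.length ≤ n → ∀ (j : Nat) (acc : List String),
    (PySem.List.enumerate xs ((j : Int) * (K : Int) + 1)).foldl (bodyA simbolos (K : Int)) acc
      = acc ++ chunkGo simbolos K j xs := by
  intro n
  induction n with
  | zero =>
      intro xs hl j acc
      have hxs : xs = [] := List.eq_nil_of_length_eq_zero (Nat.le_zero.mp hl)
      subst hxs
      rw [chunkGo, if_neg (by simp only [List.length_nil]; omega)]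
      simp [PySem.List.enumerate]
  | succ n ih =>
      intro xs hl j acc
      by_cases hfull : K ≤ xs.length
      · have hlt : K - 1 < xs.length := by omega
        have hk1 : K - 1 + 1 = K := by omega
        have htake : xs.take K = xs.take (K - 1) ++ [xs[K - 1]] := by
          conv_lhs => rw [← hk1]
          rw [List.take_add_one, List.getElem?_eq_getElem hlt]
          rfl
        have hxs : xs = xs.take (K - 1) ++ ([xs[K - 1]] ++ xs.drop K) := by
          conv_lhs => rw [← List.take_append_drop K xs]
          rw [htake, List.append_assoc]
        have hlenA1 : (xs.take (K - 1)).length = K - 1 := by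
          simp [List.length_take]; omega
        rw [chunkGo, if_pos ⟨hK, hfull⟩]
        conv_lhs => rw [hxs]
        rw [enum_append, List.singleton_append, List.foldl_append]
        rw [foldA_no_trigger simbolos (K : Int) _ _ acc ?_]
        · rw [hlenA1, PySem.List.enumerate_cons, List.foldl_cons]
          have hc : (j : Int) * (K : Int) + 1 + ((K : Nat) - 1 : Nat) = ((j : Int) + 1) * (K : Int) := by
            push_cast [Nat.cast_sub (by omega : 1 ≤ K)]
            ring
          rw [hc]
          have hb : bodyA simbolos (K : Int) (acc ++ xs.take (K - 1)) (((j : Int) + 1) * (K : Int), xs[K - 1]) =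
              acc ++ xs.take (K - 1) ++ [xs[K - 1]] ++ sym simbolos j := by
            unfold bodyA
            rw [if_pos (((PySem.Int.mod_eq_zero_iff_dvd _ _).mpr (dvd_mul_left _ _)))]
            have hfd : PySem.Int.floordiv (((j : Int) + 1) * (K : Int)) (K : Int) = (j : Int) + 1 := by
              rw [PySem.Int.floordiv_eq_iff_of_pos (by exact_mod_cast hK)]
              constructor
              · exact le_refl _
              · have h1 : ((j : Int) + 1 + 1) * (K : Int) = ((j : Int) + 1) * (K : Int) + (K : Int) := by ring
                have h2 : (0 : Int) < (K : Int) := by exact_mod_cast hK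
                omega
            rw [hfd]
            have : (j : Int) + 1 - 1 = ((j : Nat) : Int) := by ring
            rw [this, PySem.Int.mod_natCast]
            rfl
          rw [hb]
          have hlrest : (xs.drop K).length ≤ n := by
            simp only [List.length_drop]; omega
          have hs2 : ((j : Int) + 1) * (K : Int) + 1 = ((j + 1 : Nat) : Int) * (K : Int) + 1 := by
            push_cast; ring
          rw [hs2, ih (xs.drop K) hlrest (j + 1) _]
          rw [htake]
          simp [List.append_assoc]
        · rw [hlenA1]
          intro t ht
          apply not_dvd_between (K : Int) (j : Int)
          · exact_mod_cast hK
          · omega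
          · have : (t : Int) < ((K : Int) - 1) := by
              have : (t : Int) < ((K - 1 : Nat) : Int) := by exact_mod_cast ht
              push_cast [Nat.cast_sub (by omega : 1 ≤ K)] at this
              omega
            have h1 : ((j : Int) + 1) * (K : Int) = (j : Int) * (K : Int) + (K : Int) := by ring
            omega
      · rw [chunkGo, if_neg (by omega)]
        apply foldA_no_trigger
        intro t ht
        apply not_dvd_between (K : Int) (j : Int)
        · exact_mod_cast hK
        · omega
        · have h1 : ((j : Int) + 1) * (K : Int) = (j : Int) * (K : Int) + (K : Int) := by ring
          have : (t : Int) < (xs.length : Int) := by exact_mod_cast ht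
          have : (xs.length : Int) < (K : Int) := by exact_mod_cast (by omega : xs.length < K)
          omega

-- B's suffix loop computes the same block decomposition
theorem goB_chunk (simbolos : List String) (K : Nat) (hK : 0 < K) :
    ∀ (n : Nat) (resto : List String), resto.length ≤ n → ∀ (j : Nat) (saida : List String),
    goB simbolos (K : Int) saida resto (j : Int) = saida ++ chunkGo simbolos K j resto := by
  intro n
  induction n with
  | zero =>
      intro resto hl j saida
      have hr : resto = [] := List.eq_nil_of_length_eq_zero (Nat.le_zero.mp hl)
      subst hr
      rw [goB, dif_neg (by simp only [List.length_nil]; omega),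
        chunkGo, if_neg (by simp only [List.length_nil]; omega)]
  | succ n ih =>
      intro resto hl j saida
      by_cases hfull : K ≤ resto.length
      · rw [goB, dif_pos ⟨by exact_mod_cast hK, by exact_mod_cast hfull⟩]
        rw [PySem.List.slice_to_natCast, PySem.List.slice_from_natCast, PySem.Int.mod_natCast]
        have hs : ((j : Int) + 1) = ((j + 1 : Nat) : Int) := by push_cast; ring
        rw [hs, ih (resto.drop K) (by simp only [List.length_drop]; omega) (j + 1) _]
        conv_rhs => rw [chunkGo]
        rw [if_pos ⟨hK, hfull⟩]
        simp [sym, List.append_assoc]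
      · rw [goB, dif_neg (by
          intro hc
          exact hfull (by exact_mod_cast hc.2)),
          chunkGo, if_neg (by omega)]

-- ===== VERDICT (by name: the statement is the Claim_ definition above) =====
theorem adicionar_simbolo_spec : Claim_equal_adicionar_simbolo := by
  intro linhas simbolos k _ hpre
  unfold Spec_adicionar_simbolo adicionar_simbolo adicionar_simbolo_alt
  rcases hpre with hnil | ⟨hneg, hshort⟩ | ⟨hk, -⟩
  · subst hnil
    rw [goB, dif_neg (by simp only [List.length_nil]; omega)]
    simp [PySem.List.enumerate]
  · rw [goB, dif_neg (by omega)]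
    rw [foldA_no_trigger simbolos k linhas 1 [] ?_]
    intro t ht hdvd
    have hd : (-k) ∣ (1 + (t : Int)) := (Int.neg_dvd).mpr hdvd
    have hle := Int.le_of_dvd (by omega) hd
    have : (t : Int) < (linhas.length : Int) := by exact_mod_cast ht
    omega
  · have hkK : ((k.toNat : Nat) : Int) = k := Int.toNat_of_nonneg (by omega)
    have hKpos : 0 < k.toNat := by omega
    rw [← hkK]
    have hA := foldA_chunk simbolos k.toNat hKpos linhas.length linhas (le_refl _) 0 []
    have hB := goB_chunk simbolos k.toNat hKpos linhas.length linhas (le_refl _) 0 []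
    simp only [Nat.cast_zero, zero_mul, zero_add] at hA hB
    rw [hA, hB]
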